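-- pv_equiv track=rewrite | github.com/Bregza1309/python-cryptography-modules | AES_CBC/bit_encryption_functions.py | string_to_hex
-- ===== SOURCE A (Python) =====
-- def string_to_hex(string):
--     bin_string = ''.join(format(b,'08b') for b in bytearray(string,encoding="utf-8"))
--     while True:
--         if len(bin_string)<64:
--             bin_string = bin_string + '0'
--         else:
--             break
--     hex_string = binary_to_hex(bin_string)
--     return hex_string
--
-- def binary_to_hex(binary):
--     hex_key ={'0':'0000',
--                '1':'0001',
--                '2':'0010',
--                '3':'0011',
--                '4':'0100',
--                '5':'0101',
--                '6':'0110',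
--                '7':'0111',
--                '8':'1000',
--                '9':'1001',
--                'A':'1010',
--                'B':'1011',
--                'C':'1100',
--                'D':'1101',
--                'E':'1110',
--                'F':'1111', }
--
--
--     bin_list =[]
--     hex_list = []
--     hex_str = ""
--     i = 0
--     while i<len(binary):
--         bin_list.append(binary[i:i+4])
--         i+= 4
--     i = 0
--     while i < len(bin_list):
--         for key,value in hex_key.items():
--             if bin_list[i] == value:
--                 hex_list.append(key)
--                 hex_str = ''.join(hex_list)
--         i+=1
--
--
--
--     return hex_str
-- ===== SOURCE B (Python) =====
-- def string_to_hex(string):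
--     b = bytearray(string, encoding="utf-8")
--     if len(b) < 8:
--         b.extend(bytes(8 - len(b)))
--     return b.hex().upper()
-- ===== Notes on version B (the rewrite author's own statement) =====
-- stated objective: faster
-- what changed: B drops A's bit-string pipeline (per-byte '08b' strings joined, a while-loop appending '0' bits up to 64 bits, 4-character chunking and a 16-entry dict scan per nibble with a re-join of the whole digit list at every step) and instead pads the UTF-8 byte sequence to a minimum of 8 bytes and returns bytes.hex().upper() directly.
import Mathlib
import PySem

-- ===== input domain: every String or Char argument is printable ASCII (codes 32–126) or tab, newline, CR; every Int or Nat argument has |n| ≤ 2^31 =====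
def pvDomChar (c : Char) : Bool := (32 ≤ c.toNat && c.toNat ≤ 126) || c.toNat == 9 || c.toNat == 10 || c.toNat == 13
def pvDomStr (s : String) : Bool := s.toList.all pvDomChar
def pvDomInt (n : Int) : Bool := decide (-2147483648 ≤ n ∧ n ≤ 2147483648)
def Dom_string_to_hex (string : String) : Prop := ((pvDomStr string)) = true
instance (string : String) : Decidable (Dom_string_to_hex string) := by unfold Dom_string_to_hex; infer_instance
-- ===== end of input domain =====

-- B replaces A's bit-string pipeline (per-byte '08b' strings, a while-loop padding to 64 bits,
-- 4-bit chunking and a dict scan per nibble) by direct byte-level hex: pad the byte list to 8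
-- bytes and emit two hex digits per byte (idiomatic; return value only, no mutation observable).

-- shared helper: bytearray(string, encoding="utf-8") — exact UTF-8 encoding of a code point
def pyUtf8Char (c : Char) : List Nat :=
  let n := c.toNat
  if n < 128 then [n]
  else if n < 2048 then [192 + n / 64, 128 + n % 64]
  else if n < 65536 then [224 + n / 4096, 128 + (n / 64) % 64, 128 + n % 64]
  else [240 + n / 262144, 128 + (n / 4096) % 64, 128 + (n / 64) % 64, 128 + n % 64]

def pyBytes (s : String) : List Nat := s.toList.flatMap pyUtf8Char

-- ===== PORT A =====
-- format(b,'08b'): 8 binary digits, most significant first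
def fmt08b (b : Nat) : List Char :=
  (List.range 8).map (fun i => if b / 2 ^ (7 - i) % 2 = 1 then '1' else '0')

-- the hex_key dict, in insertion order
def hexKey : List (Char × List Char) :=
  [('0', ['0','0','0','0']), ('1', ['0','0','0','1']), ('2', ['0','0','1','0']),
   ('3', ['0','0','1','1']), ('4', ['0','1','0','0']), ('5', ['0','1','0','1']),
   ('6', ['0','1','1','0']), ('7', ['0','1','1','1']), ('8', ['1','0','0','0']),
   ('9', ['1','0','0','1']), ('A', ['1','0','1','0']), ('B', ['1','0','1','1']),
   ('C', ['1','1','0','0']), ('D', ['1','1','0','1']), ('E', ['1','1','1','0']),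
   ('F', ['1','1','1','1'])]

-- the first while loop of binary_to_hex: binary[i:i+4] slices, i += 4
def chunks4 (l : List Char) : List (List Char) :=
  if h : l = [] then [] else l.take 4 :: chunks4 (l.drop 4)
termination_by l.length
decreasing_by
  have := List.length_pos_of_ne_nil h
  simp
  omega

-- the inner 'for key,value in hex_key.items()' loop body, state = (hex_list, hex_str)
def hexScan (c : List Char) (st : List Char × List Char) : List Char × List Char :=
  hexKey.foldl (fun st2 kv =>
    if c = kv.2 then (st2.1 ++ [kv.1], st2.1 ++ [kv.1]) else st2) st

def binary_to_hex (binary : List Char) : List Char :=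
  ((chunks4 binary).foldl (fun st c => hexScan c st) ([], [])).2

-- the padding while-loop of string_to_hex
def pad64 (l : List Char) : List Char :=
  if l.length < 64 then pad64 (l ++ ['0']) else l
termination_by 64 - l.length
decreasing_by simp; omega

def string_to_hex (string : String) : String :=
  String.mk (binary_to_hex (pad64 ((pyBytes string).flatMap fmt08b)))

-- ===== PORT B =====
-- bytes.hex().upper() for one byte: two uppercase hex digits
def hexDigit (n : Nat) : Char := (['0','1','2','3','4','5','6','7','8','9','A','B','C','D','E','F']).getD n '0'
def byteHex (x : Nat) : List Char := [hexDigit (x / 16), hexDigit (x % 16)]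

def string_to_hex_alt (string : String) : String :=
  let b := pyBytes string
  let b := if b.length < 8 then b ++ List.replicate (8 - b.length) 0 else b
  String.mk (b.flatMap byteHex)

-- ===== PRECONDITION & SPEC =====
def Spec_string_to_hex (string : String) (out : String) : Prop := out = string_to_hex_alt string
instance (string : String) (out : String) : Decidable (Spec_string_to_hex string out) := by unfold Spec_string_to_hex; infer_instance

-- ===== CLAIM (what is proved, stated in full; the proofs are below) =====
def Claim_equal_string_to_hex : Prop := ∀ (string : String), Dom_string_to_hex string → Spec_string_to_hex string (string_to_hex string)

-- ===== LEMMAS AND PROOFS =====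

-- one nibble as bit characters
def nib (m : Nat) : List Char :=
  [if m / 8 % 2 = 1 then '1' else '0', if m / 4 % 2 = 1 then '1' else '0',
   if m / 2 % 2 = 1 then '1' else '0', if m % 2 = 1 then '1' else '0']

set_option maxRecDepth 20000 in
lemma fmt08b_split : ∀ x : Fin 256, fmt08b x.val = nib (x.val / 16) ++ nib (x.val % 16) := by decide

lemma nib_length (m : Nat) : (nib m).length = 4 := rfl

lemma hexScan_nib (m : Nat) (hm : m < 16) (st : List Char × List Char) :
    hexScan (nib m) st = (st.1 ++ [hexDigit m], st.1 ++ [hexDigit m]) := by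
  interval_cases m <;> simp [hexScan, hexKey, nib, hexDigit, List.foldl]

lemma chunks4_nil : chunks4 [] = [] := by rw [chunks4.eq_def]; simp

lemma chunks4_cons8 (a rest : List Char) (ha : a.length = 8) :
    chunks4 (a ++ rest) = a.take 4 :: a.drop 4 :: chunks4 rest := by
  have h1 : a ++ rest ≠ [] := by simp; intro h; simp [h] at ha
  rw [chunks4.eq_def]
  rw [dif_neg h1, List.take_append_of_le_length (by omega), List.drop_append_of_le_length (by omega)]
  have h2 : a.drop 4 ++ rest ≠ [] := by
    intro h
    have := congrArg List.length h; simp at this; omega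
  rw [chunks4.eq_def]
  rw [dif_neg h2, List.take_append_of_le_length (by simp; omega)]
  congr 2
  · exact List.take_of_length_le (by simp; omega)
  · rw [List.drop_append_of_le_length (by simp; omega)]
    have : (a.drop 4).drop 4 = [] := by
      apply List.drop_eq_nil_of_le
      simp; omega
    rw [this]
    simp

lemma fold_inv (l : List Nat) (acc : List Char) (hl : ∀ x ∈ l, x < 256) :
    (chunks4 (l.flatMap fmt08b)).foldl (fun st c => hexScan c st) (acc, acc)
      = (acc ++ l.flatMap byteHex, acc ++ l.flatMap byteHex) := by
  induction l generalizing acc with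
  | nil => simp [chunks4_nil]
  | cons x xs ih =>
    have hx : x < 256 := hl x (by simp)
    have hsplit := fmt08b_split ⟨x, hx⟩
    simp only [List.flatMap_cons]
    have hlen : (fmt08b x).length = 8 := by
      rw [hsplit]; simp [nib_length]
    rw [← List.append_assoc, chunks4_cons8 _ _ hlen]
    have htake : (fmt08b x).take 4 = nib (x / 16) := by
      rw [hsplit, List.take_append_of_le_length (by simp [nib_length])]
      exact List.take_of_length_le (by simp [nib_length])
    have hdrop : (fmt08b x).drop 4 = nib (x % 16) := by
      rw [hsplit, List.drop_append_of_le_length (by simp [nib_length])]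
      simp [nib_length]
    rw [List.foldl_cons, List.foldl_cons, htake, hdrop]
    rw [hexScan_nib _ (Nat.div_lt_of_lt_mul (by omega)) _,
        hexScan_nib _ (Nat.mod_lt _ (by omega)) _]
    simp only []
    rw [ih _ (fun y hy => hl y (by simp [hy]))]
    simp [byteHex]

lemma pad64_eq (l : List Char) : pad64 l = l ++ List.replicate (64 - l.length) '0' := by
  fun_induction pad64 l with
  | case1 l h ih =>
    rw [ih]
    have : 64 - l.length = (64 - (l ++ ['0']).length) + 1 := by simp; omega
    rw [this, List.replicate_succ]
    simp
  | case2 l h =>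
    have : 64 - l.length = 0 := by omega
    simp [this]

lemma fmt08b_zero : fmt08b 0 = List.replicate 8 '0' := by decide

lemma flatMap_fmt_replicate (m : Nat) :
    (List.replicate m (0 : Nat)).flatMap fmt08b = List.replicate (8 * m) '0' := by
  induction m with
  | zero => simp
  | succ n ih =>
    rw [List.replicate_succ, List.flatMap_cons, ih, fmt08b_zero]
    rw [← List.replicate_add]
    congr 1
    omega

lemma fmt08b_length (x : Nat) : (fmt08b x).length = 8 := by simp [fmt08b]

lemma pyBytes_dom (s : String) (h : pvDomStr s = true) :
    ∀ x ∈ pyBytes s, x < 256 := by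
  intro x hx
  simp only [pyBytes, List.mem_flatMap] at hx
  obtain ⟨c, hc, hxc⟩ := hx
  have hdc : pvDomChar c = true := by
    simp only [pvDomStr, List.all_eq_true] at h
    exact h c hc
  simp only [pvDomChar, Bool.or_eq_true, Bool.and_eq_true, decide_eq_true_eq, beq_iff_eq] at hdc
  have hlt : c.toNat < 128 := by omega
  simp only [pyUtf8Char, if_pos hlt, List.mem_singleton] at hxc
  omega

-- ===== VERDICT (by name: the statement is the Claim_ definition above) =====
theorem string_to_hex_spec : Claim_equal_string_to_hex := by
  intro s hdom
  unfold Spec_string_to_hex string_to_hex string_to_hex_alt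
  set bs := pyBytes s with hbs
  have hlt : ∀ x ∈ bs, x < 256 := pyBytes_dom s hdom
  have hflen : (bs.flatMap fmt08b).length = 8 * bs.length := by
    rw [List.length_flatMap]
    simp [fmt08b_length, List.map_const']
    omega
  have hpad : pad64 (bs.flatMap fmt08b)
      = (bs ++ List.replicate (8 - bs.length) 0).flatMap fmt08b := by
    rw [pad64_eq, List.flatMap_append, flatMap_fmt_replicate, hflen]
    congr 2
    omega
  rw [hpad]
  set pb := bs ++ List.replicate (8 - bs.length) 0 with hpb
  have hpblt : ∀ x ∈ pb, x < 256 := by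
    intro x hx
    rw [hpb] at hx
    rcases List.mem_append.mp hx with h | h
    · exact hlt x h
    · have := List.eq_of_mem_replicate h; omega
  have : binary_to_hex (pb.flatMap fmt08b) = pb.flatMap byteHex := by
    unfold binary_to_hex
    rw [fold_inv pb [] hpblt]
    simp
  rw [this]
  congr 1
  by_cases hc : bs.length < 8
  · simp only [if_pos hc, hpb, List.flatMap_append]
  · have h0 : 8 - bs.length = 0 := by omega
    simp [hc, hpb, h0]
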